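-- pv_equiv track=rewrite | github.com/p-koenig/bwinfCodeNew | Aufgabe3_Gluecksspiel/mainAufgabe3_Gluecksspiel.py | auszahlungberechnen
-- ===== SOURCE A (Python) =====
-- def auszahlungberechnen(gewinnzahlen, glueckszahlen):
--     auszahlung = 0
--     for zahl in glueckszahlen:
--         kleinstedifferenz = 1000
--         for gesetztezahl in gewinnzahlen:
--             if kleinstedifferenz >= abs(gesetztezahl - zahl):
--                 kleinstedifferenz = abs(gesetztezahl - zahl)
--         auszahlung += kleinstedifferenz
--     return auszahlung
-- ===== SOURCE B (Python) =====
-- def auszahlungberechnen(gewinnzahlen, glueckszahlen):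
--     s = sorted(gewinnzahlen)
--     n = len(s)
--     total = 0
--     for z in glueckszahlen:
--         # bisect_left by hand (A imports nothing, so no bisect module)
--         lo, hi = 0, n
--         while lo < hi:
--             mid = (lo + hi) // 2
--             if s[mid] < z:
--                 lo = mid + 1
--             else:
--                 hi = mid
--         d = 1000
--         if lo < n:
--             d = min(d, s[lo] - z)
--         if lo > 0:
--             d = min(d, z - s[lo - 1])
--         total += d
--     return total
-- ===== Notes on version B (the rewrite author's own statement) =====
-- stated objective: faster
-- what changed: B sorts the winning numbers once and finds each lucky number's nearest neighbour by binary search (two boundary candidates), instead of A's full inner scan per lucky number.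
import Mathlib
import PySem

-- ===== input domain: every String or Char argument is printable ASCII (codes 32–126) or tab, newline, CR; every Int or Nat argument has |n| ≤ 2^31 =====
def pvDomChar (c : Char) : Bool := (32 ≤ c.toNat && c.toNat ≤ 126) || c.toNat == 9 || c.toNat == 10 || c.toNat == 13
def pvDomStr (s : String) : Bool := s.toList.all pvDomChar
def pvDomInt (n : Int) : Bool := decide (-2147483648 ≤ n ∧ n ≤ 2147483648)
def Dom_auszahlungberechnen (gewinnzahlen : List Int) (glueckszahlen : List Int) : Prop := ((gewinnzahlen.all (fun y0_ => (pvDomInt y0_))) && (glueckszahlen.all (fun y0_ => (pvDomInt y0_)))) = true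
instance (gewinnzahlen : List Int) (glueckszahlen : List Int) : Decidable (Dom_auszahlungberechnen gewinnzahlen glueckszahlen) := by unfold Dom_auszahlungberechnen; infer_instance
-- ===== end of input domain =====

-- B sorts the winning numbers once and binary-searches each lucky number's nearest neighbour
-- instead of A's full inner scan per lucky number (objective: faster).


-- ===== PORT A =====
def auszahlungberechnen (gewinnzahlen : List Int) (glueckszahlen : List Int) : Int :=
  glueckszahlen.foldl
    (fun auszahlung zahl =>
      auszahlung +
        gewinnzahlen.foldl
          (fun kleinstedifferenz gesetztezahl =>
            if kleinstedifferenz ≥ |gesetztezahl - zahl| then |gesetztezahl - zahl|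
            else kleinstedifferenz)
          1000)
    0

-- ===== PORT B =====
-- Source B's hand-written lo/hi/mid loop is exactly PySem.List.bisectLeft's loop (same state, same steps)
def nearestCapB (s : List Int) (z : Int) : Int :=
  let lo := PySem.List.bisectLeft s z
  let d1 := if lo < s.length then min 1000 (s.getD lo 0 - z) else 1000
  if 0 < lo then min d1 (z - s.getD (lo - 1) 0) else d1

def auszahlungberechnen_alt (gewinnzahlen : List Int) (glueckszahlen : List Int) : Int :=
  let s := PySem.List.sorted gewinnzahlen (fun x => x) false
  glueckszahlen.foldl (fun total z => total + nearestCapB s z) 0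

-- ===== PRECONDITION & SPEC =====
def Spec_auszahlungberechnen (gewinnzahlen : List Int) (glueckszahlen : List Int) (out : Int) : Prop := out = auszahlungberechnen_alt gewinnzahlen glueckszahlen
instance (gewinnzahlen : List Int) (glueckszahlen : List Int) (out : Int) : Decidable (Spec_auszahlungberechnen gewinnzahlen glueckszahlen out) := by unfold Spec_auszahlungberechnen; infer_instance

-- ===== CLAIM (what is proved, stated in full; the proofs are below) =====
def Claim_equal_auszahlungberechnen : Prop := ∀ (gewinnzahlen : List Int) (glueckszahlen : List Int), Dom_auszahlungberechnen gewinnzahlen glueckszahlen → Spec_auszahlungberechnen gewinnzahlen glueckszahlen (auszahlungberechnen gewinnzahlen glueckszahlen)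

-- ===== LEMMAS AND PROOFS =====

-- A's inner loop is a running min of |g - z| with start value 1000
theorem innerA_eq_minfold (gs : List Int) (z : Int) (c : Int) :
    gs.foldl (fun k g => if k ≥ |g - z| then |g - z| else k) c
      = gs.foldl (fun k g => min k |g - z|) c := by
  induction gs generalizing c with
  | nil => rfl
  | cons g t ih =>
      simp only [List.foldl_cons]
      rw [ih]
      congr 1
      generalize |g - z| = d
      simp only [ge_iff_le, min_def]
      split_ifs <;> omega

theorem minfold_le_init (gs : List Int) (z : Int) (c : Int) :
    gs.foldl (fun k g => min k |g - z|) c ≤ c := by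
  induction gs generalizing c with
  | nil => simp
  | cons g t ih =>
      simp only [List.foldl_cons]
      exact le_trans (ih _) (min_le_left _ _)

theorem minfold_le_mem (gs : List Int) (z : Int) :
    ∀ (c g : Int), g ∈ gs → gs.foldl (fun k x => min k |x - z|) c ≤ |g - z| := by
  induction gs with
  | nil => intro c g hg; cases hg
  | cons a t ih =>
      intro c g hg
      simp only [List.foldl_cons]
      rcases List.mem_cons.mp hg with h | h
      · subst h
        exact le_trans (minfold_le_init t z _) (min_le_right _ _)
      · exact ih _ g h

theorem minfold_cases (gs : List Int) (z : Int) :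
    ∀ (c : Int), gs.foldl (fun k x => min k |x - z|) c = c ∨
      ∃ g ∈ gs, gs.foldl (fun k x => min k |x - z|) c = |g - z| := by
  induction gs with
  | nil => intro c; exact Or.inl rfl
  | cons a t ih =>
      intro c
      simp only [List.foldl_cons]
      rcases ih (min c |a - z|) with h | ⟨g, hg, h⟩
      · rcases le_total c |a - z| with hle | hle
        · exact Or.inl (by rw [h, min_eq_left hle])
        · exact Or.inr ⟨a, List.mem_cons_self, by rw [h, min_eq_right hle]⟩
      · exact Or.inr ⟨g, List.mem_cons_of_mem _ hg, h⟩

-- on a sorted list, the running min of distances equals B's two-candidate formula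
theorem minfold_eq_nearestCapB (s : List Int) (z : Int)
    (hs : s.Pairwise (· ≤ ·)) :
    s.foldl (fun k g => min k |g - z|) 1000 = nearestCapB s z := by
  obtain ⟨hlen, hlt, hge⟩ := PySem.List.bisectLeft_spec s z hs
  set lo := PySem.List.bisectLeft s z with hlo
  set M := s.foldl (fun k g => min k |g - z|) 1000 with hM
  have hmono := List.pairwise_iff_getElem.mp hs
  have hnc : nearestCapB s z =
      (if 0 < lo then
        min (if lo < s.length then min 1000 (s.getD lo 0 - z) else 1000) (z - s.getD (lo - 1) 0)
       else (if lo < s.length then min 1000 (s.getD lo 0 - z) else 1000)) := rfl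
  rw [hnc]
  -- M is below every candidate that is present
  have hM1000 : M ≤ 1000 := minfold_le_init s z 1000
  have hMlo : lo < s.length → M ≤ s.getD lo 0 - z := by
    intro h
    have hz : z ≤ s[lo] := hge lo h (le_refl _)
    have := minfold_le_mem s z 1000 s[lo] (List.getElem_mem h)
    rw [List.getD_eq_getElem s 0 h]
    calc M ≤ |s[lo] - z| := this
      _ = s[lo] - z := abs_of_nonneg (by omega)
  have hMlo1 : 0 < lo → M ≤ z - s.getD (lo - 1) 0 := by
    intro h
    have hlt' : lo - 1 < s.length := by omega
    have hz : s[lo - 1] < z := hlt (lo - 1) hlt' (by omega)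
    have := minfold_le_mem s z 1000 s[lo - 1] (List.getElem_mem hlt')
    rw [List.getD_eq_getElem s 0 hlt']
    calc M ≤ |s[lo - 1] - z| := this
      _ = z - s[lo - 1] := by rw [abs_sub_comm]; exact abs_of_nonneg (by omega)
  -- the candidate value is below the distance of every element
  have hdle : ∀ g ∈ s, (if 0 < lo then
        min (if lo < s.length then min 1000 (s.getD lo 0 - z) else 1000) (z - s.getD (lo - 1) 0)
       else (if lo < s.length then min 1000 (s.getD lo 0 - z) else 1000)) ≤ |g - z| := by
    intro g hg
    obtain ⟨j, hj, rfl⟩ := List.getElem_of_mem hg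
    by_cases hjlo : j < lo
    · -- j is left of lo: its distance z - s[j] dominates z - s[lo-1]
      have h0 : 0 < lo := by omega
      have hlt' : lo - 1 < s.length := by omega
      have hle : s[j] ≤ s[lo - 1] := by
        rcases Nat.lt_or_ge j (lo - 1) with h | h
        · exact hmono j (lo - 1) hj hlt' h
        · have : j = lo - 1 := by omega
          subst this; exact le_refl _
      have hz : s[j] < z := hlt j hj hjlo
      have habs : |s[j] - z| = z - s[j] := by
        rw [abs_sub_comm]; exact abs_of_nonneg (by omega)
      rw [if_pos h0, List.getD_eq_getElem s 0 hlt', habs]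
      exact le_trans (min_le_right _ _) (by omega)
    · -- j is at or right of lo: its distance s[j] - z dominates s[lo] - z
      have hlon : lo < s.length := by omega
      have hle : s[lo] ≤ s[j] := by
        rcases Nat.lt_or_ge lo j with h | h
        · exact hmono lo j hlon hj h
        · have : lo = j := by omega
          subst this; exact le_refl _
      have hz : z ≤ s[j] := hge j hj (by omega)
      have habs : |s[j] - z| = s[j] - z := abs_of_nonneg (by omega)
      have hcand : (if lo < s.length then min 1000 (s.getD lo 0 - z) else 1000) ≤ |s[j] - z| := by
        rw [if_pos hlon, List.getD_eq_getElem s 0 hlon, habs]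
        exact le_trans (min_le_right _ _) (by omega)
      split_ifs with h0
      · exact le_trans (min_le_left _ _) (by simpa [hlon] using hcand)
      · simpa [hlon] using hcand
  apply le_antisymm
  · split_ifs with h0 hlon hlon
    · exact le_min (le_min hM1000 (hMlo hlon)) (hMlo1 h0)
    · exact le_min hM1000 (hMlo1 h0)
    · exact le_min hM1000 (hMlo hlon)
    · exact hM1000
  · rcases minfold_cases s z 1000 with h | ⟨g, hg, h⟩
    · rw [← hM] at h; rw [h]; split_ifs <;> omega
    · rw [← hM] at h; rw [h]; exact hdle g hg

-- A's inner loop on the unsorted list equals B's binary-search formula on the sorted list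
theorem inner_eq (gs : List Int) (z : Int) :
    gs.foldl (fun k g => if k ≥ |g - z| then |g - z| else k) 1000
      = nearestCapB (PySem.List.sorted gs (fun x => x) false) z := by
  rw [innerA_eq_minfold]
  have hperm : (PySem.List.sorted gs (fun x => x) false).Perm gs :=
    PySem.List.sorted_perm gs (fun x => x) false
  have hpair : (PySem.List.sorted gs (fun x => x) false).Pairwise (· ≤ ·) :=
    PySem.List.sorted_pairwise gs (fun x => x)
  rw [← minfold_eq_nearestCapB _ z hpair]
  haveI : RightCommutative (fun (k : Int) (g : Int) => min k |g - z|) :=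
    ⟨fun k a b => min_right_comm k |a - z| |b - z|⟩
  exact (hperm.foldl_eq 1000).symm

-- ===== VERDICT (by name: the statement is the Claim_ definition above) =====
theorem auszahlungberechnen_spec : Claim_equal_auszahlungberechnen := by
  intro gs zs _
  unfold Spec_auszahlungberechnen auszahlungberechnen auszahlungberechnen_alt
  have hf : (fun (a zahl : Int) =>
      a + gs.foldl (fun kleinstedifferenz gesetztezahl =>
            if kleinstedifferenz ≥ |gesetztezahl - zahl| then |gesetztezahl - zahl|
            else kleinstedifferenz) 1000)
      = fun (a z : Int) => a + nearestCapB (PySem.List.sorted gs (fun x => x) false) z := by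
    funext a z
    rw [inner_eq]
  rw [hf]
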